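-- pv_equiv track=rewrite | github.com/sakuralggm/algorithm_training | bytedance/数字字符串格式化.py | solution
-- ===== SOURCE A (Python) =====
-- def solution(s: str) -> str:
--     # Edit your code here
--     if '.' in s:
--         s, decimal = s.split('.')
--     else:
--         decimal = ''
--     # or 是一个逻辑运算符，用于返回第一个为真的值。如果第一个值为假，返回第二个值。
--     # 这行代码确保了即使原始字符串 s 全部由 '0' 组成，最终结果也不会是空字符串，而是 '0'。
--     s = s.lstrip('0') or '0'
--     s = s[::-1]
--     s = ','.join([s[i:i+3] for i in range(0, len(s), 3)])
--     return s[::-1] + ('.' + decimal if decimal else '')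
-- ===== SOURCE B (Python) =====
-- def solution(s: str) -> str:
--     intpart, _, decimal = s.partition('.')
--     intpart = intpart.lstrip('0') or '0'
--     offset = len(intpart) % 3
--     parts = [intpart[:offset]] if offset else []
--     parts += [intpart[i:i+3] for i in range(offset, len(intpart), 3)]
--     return ','.join(parts) + ('.' + decimal if decimal else '')
-- ===== Notes on version B (the rewrite author's own statement) =====
-- stated objective: alternative
-- what changed: Groups digits left-to-right from an explicit len%3 offset (partition + forward slices) instead of reversing the string, chunking from the front, and reversing back; both string reversals disappear.
-- outside the precondition, e.g. on solution('1.2.3'): A raises ValueError, B returns '1.2.3'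
import Mathlib
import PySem

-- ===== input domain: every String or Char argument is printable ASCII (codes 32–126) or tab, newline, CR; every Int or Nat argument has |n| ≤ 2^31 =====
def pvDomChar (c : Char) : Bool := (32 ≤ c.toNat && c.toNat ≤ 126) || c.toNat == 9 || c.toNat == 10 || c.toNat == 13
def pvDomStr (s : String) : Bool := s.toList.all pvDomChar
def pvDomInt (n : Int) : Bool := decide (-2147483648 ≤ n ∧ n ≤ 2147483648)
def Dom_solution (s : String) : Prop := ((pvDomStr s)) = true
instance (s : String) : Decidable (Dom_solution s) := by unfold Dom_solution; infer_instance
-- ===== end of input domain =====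

-- B groups the digits left-to-right from an explicit len%3 offset instead of A's reverse/chunk/reverse;
-- equivalence of the return values is proved on strings with at most one '.' (A raises ValueError otherwise).

-- ===== PORT A =====
-- Chars-level transliteration of A's body (strings handled as List Char; s.lstrip('0') is
-- dropWhile (== '0'), exact for a single strip character; s[::-1] is List.reverse, cf.
-- PySem.List.slice?_none_none_neg_one).
def solutionChars (cs : List Char) : List Char :=
  let p : List Char × List Char :=
    if PySem.Chars.isIn ['.'] cs then
      match PySem.Chars.split? cs ['.'] with
      | some [a, b] => (a, b)
      | _ => (cs, [])   -- unreachable inside Pre_: with ≥ 2 dots Python's tuple unpacking raises ValueError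
    else (cs, [])
  let s1 := p.1.dropWhile (· == '0')          -- s.lstrip('0')
  let s2 := if s1 = [] then ['0'] else s1     -- … or '0'
  let r := s2.reverse                          -- s[::-1]
  let j := PySem.Chars.join [',']
      ((PySem.List.pyRange 0 (r.length : Int) 3).map
        (fun i => PySem.List.slice r (some i) (some (i + 3))))
  j.reverse ++ (if p.2 = [] then [] else '.' :: p.2)

def solution (s : String) : String := String.ofList (solutionChars s.toList)

-- ===== PORT B =====
-- Chars-level transliteration of B's body; s.partition('.') is exact as takeWhile / dropWhile+tail
-- for the one-character separator '.'.
def solutionAltChars (cs : List Char) : List Char :=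
  let ip := cs.takeWhile (· != '.')                 -- intpart, _, decimal = s.partition('.')
  let dec := (cs.dropWhile (· != '.')).tail
  let t0 := ip.dropWhile (· == '0')                 -- intpart.lstrip('0')
  let t := if t0 = [] then ['0'] else t0            -- … or '0'
  let off := PySem.Int.mod (t.length : Int) 3       -- offset = len(intpart) % 3
  let parts := (if off = 0 then [] else [PySem.List.slice t none (some off)]) ++
      ((PySem.List.pyRange off (t.length : Int) 3).map
        (fun i => PySem.List.slice t (some i) (some (i + 3))))
  PySem.Chars.join [','] parts ++ (if dec = [] then [] else '.' :: dec)

def solution_alt (s : String) : String := String.ofList (solutionAltChars s.toList)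

-- ===== PRECONDITION & SPEC =====
-- Pre_ excludes only strings with two or more dots, on which A's tuple-unpacking of the split
-- raises ValueError (A returns no value there); B partitions at the first dot and returns.
def Pre_solution (s : String) : Prop := s.toList.count '.' ≤ 1
instance (s : String) : Decidable (Pre_solution s) := by unfold Pre_solution; infer_instance
def pvWitness_solution : String := "1234.5"

def Spec_solution (s : String) (out : String) : Prop := out = solution_alt s
instance (s : String) (out : String) : Decidable (Spec_solution s out) := by unfold Spec_solution; infer_instance

-- ===== CLAIM (what is proved, stated in full; the proofs are below) =====
def Claim_equal_solution : Prop := ∀ (s : String), Dom_solution s → Pre_solution s → Spec_solution s (solution s)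

-- ===== LEMMAS AND PROOFS =====

def chunk3 : List Char → List (List Char)
  | [] => []
  | c :: rest => ((c :: rest).take 3) :: chunk3 ((c :: rest).drop 3)
  termination_by l => l.length
  decreasing_by simp

lemma pyRange3_nil {a b : Int} (h : b ≤ a) : PySem.List.pyRange a b 3 = [] := by
  rw [PySem.List.pyRange_of_pos _ _ (by norm_num)]
  simp [not_lt.mpr h]

lemma pyRange3_cons {a b : Int} (h : a < b) :
    PySem.List.pyRange a b 3 = a :: PySem.List.pyRange (a + 3) b 3 := by
  rw [PySem.List.pyRange_of_pos _ _ (by norm_num), PySem.List.pyRange_of_pos _ _ (by norm_num)]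
  by_cases h3 : a + 3 < b
  · have : ((b - a + 3 - 1) / 3).toNat = ((b - (a + 3) + 3 - 1) / 3).toNat + 1 := by omega
    rw [if_pos h, if_pos h3, this, List.range_succ_eq_map]
    simp [Function.comp_def]
    intro k _; ring
  · have : ((b - a + 3 - 1) / 3).toNat = 1 := by omega
    rw [if_pos h, if_neg h3, this]
    simp

lemma mapSliceAux : ∀ (n : Nat) (l : List Char) (a : Nat), l.length - a ≤ n →
    (PySem.List.pyRange (a : Int) (l.length : Int) 3).map
      (fun i => PySem.List.slice l (some i) (some (i + 3))) = chunk3 (l.drop a) := by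
  intro n
  induction n with
  | zero =>
    intro l a hle
    have hba : (l.length : Int) ≤ (a : Int) := by exact_mod_cast Nat.le_of_sub_eq_zero (Nat.le_zero.mp hle)
    rw [pyRange3_nil hba, List.drop_eq_nil_of_le (by exact_mod_cast hba)]
    simp [chunk3]
  | succ n ih =>
    intro l a hle
    by_cases hab : l.length ≤ a
    · rw [pyRange3_nil (by exact_mod_cast hab), List.drop_eq_nil_of_le hab]
      simp [chunk3]
    · push Not at hab
      rw [pyRange3_cons (by exact_mod_cast hab)]
      rw [List.map_cons]
      have h3 : ((a : Int) + 3) = ((a + 3 : Nat) : Int) := by push_cast; ring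
      have hsl : PySem.List.slice l (some (a : Int)) (some ((a : Int) + 3)) = (l.drop a).take 3 := by
        rw [show ((a:Int) + 3) = ((a:Int) + ((3:Nat):Int)) by norm_num]
        exact PySem.List.slice_natCast_add l a 3
      rw [hsl, h3, ih l (a + 3) (by omega)]
      obtain ⟨c, rest, hcr⟩ : ∃ c rest, l.drop a = c :: rest := by
        cases hd : l.drop a with
        | nil => simp [List.drop_eq_nil_iff] at hd; omega
        | cons c rest => exact ⟨c, rest, rfl⟩
      rw [hcr]
      rw [show l.drop (a + 3) = (l.drop a).drop 3 by rw [List.drop_drop], hcr]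
      rw [chunk3]

lemma join_append_singleton (sep y : List Char) :
    ∀ (xs : List (List Char)), xs ≠ [] →
    PySem.Chars.join sep (xs ++ [y]) = PySem.Chars.join sep xs ++ sep ++ y := by
  intro xs
  induction xs with
  | nil => intro h; exact absurd rfl h
  | cons a tl ih =>
    intro _
    cases tl with
    | nil => simp [PySem.Chars.join_cons_cons, PySem.Chars.join_singleton]
    | cons b tl' =>
      rw [List.cons_append, List.cons_append, PySem.Chars.join_cons_cons,
        PySem.Chars.join_cons_cons, ← List.cons_append, ih (by simp)]
      simp [List.append_assoc]

lemma rev_join (c : Char) : ∀ (xs : List (List Char)),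
    (PySem.Chars.join [c] xs).reverse = PySem.Chars.join [c] ((xs.map List.reverse).reverse) := by
  intro xs
  induction xs with
  | nil => simp [PySem.Chars.join_nil]
  | cons a tl ih =>
    cases tl with
    | nil => simp [PySem.Chars.join_singleton]
    | cons b tl' =>
      rw [PySem.Chars.join_cons_cons]
      have hne : ((b :: tl').map List.reverse).reverse ≠ [] := by simp
      rw [List.map_cons, List.reverse_cons, join_append_singleton _ _ _ hne]
      simp [ih]

lemma chunk3_small (l : List Char) (h : l ≠ []) (h3 : l.length ≤ 3) : chunk3 l = [l] := by
  cases l with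
  | nil => exact absurd rfl h
  | cons c rest =>
    rw [chunk3]
    simp at h3
    rw [List.take_of_length_le (by simpa using h3), List.drop_eq_nil_of_le (by simpa using h3)]
    simp [chunk3]

lemma chunk3_append (m : List Char) : ∀ (n : Nat) (l : List Char), l.length ≤ n → l.length % 3 = 0 →
    chunk3 (l ++ m) = chunk3 l ++ chunk3 m := by
  intro n
  induction n with
  | zero =>
    intro l hn _
    have : l = [] := List.length_eq_zero_iff.mp (by omega)
    simp [this, chunk3]
  | succ n ih =>
    intro l hn hmod
    cases hl : l with
    | nil => simp [chunk3]
    | cons c rest =>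
      have hlen : 3 ≤ l.length := by rw [hl] at hmod ⊢; simp at hmod ⊢; omega
      subst hl
      rw [List.cons_append, chunk3, chunk3]
      rw [← List.cons_append, List.take_append_of_le_length (by simpa using hlen),
        List.drop_append_of_le_length (by simpa using hlen)]
      rw [ih ((c :: rest).drop 3)
        (by simp only [List.length_drop, List.length_cons] at hn ⊢; omega)
        (by simp only [List.length_drop, List.length_cons] at hmod ⊢; omega)]
      simp

def offP (t : List Char) : List (List Char) :=
  (if t.length % 3 = 0 then [] else [t.take (t.length % 3)]) ++ chunk3 (t.drop (t.length % 3))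

lemma chunk3_rev : ∀ (n : Nat) (t : List Char), t.length ≤ n → t ≠ [] →
    ((chunk3 t.reverse).map List.reverse).reverse = offP t := by
  intro n
  induction n with
  | zero =>
    intro t hn ht
    exact absurd (List.length_eq_zero_iff.mp (by omega)) ht
  | succ n ih =>
    intro t hn ht
    by_cases h3 : t.length ≤ 3
    · rw [chunk3_small t.reverse (by simpa using ht) (by simpa using h3)]
      simp only [List.map_cons, List.map_nil, List.reverse_cons, List.reverse_reverse,
        List.reverse_nil, List.nil_append]
      unfold offP
      by_cases hm : t.length % 3 = 0
      · have hlen : t.length = 3 := by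
          have := List.length_pos_iff.mpr ht; omega
        rw [if_pos hm, hm]
        simp [chunk3_small t ht (by omega)]
      · have hoff : t.length % 3 = t.length := by
          have := List.length_pos_iff.mpr ht; omega
        rw [if_neg hm, hoff]
        simp [chunk3]
    · push Not at h3
      obtain ⟨k, hk⟩ : ∃ k, k = t.length - 3 := ⟨_, rfl⟩
      have hks : k < t.length := by omega
      have htk : (t.take k).length = k := by simp; omega
      have htd : (t.drop k).length = 3 := by simp; omega
      have hsplit : t.reverse = (t.drop k).reverse ++ (t.take k).reverse := by
        rw [← List.reverse_append, List.take_append_drop]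
      obtain ⟨c, rest, hcr⟩ : ∃ c rest, t.reverse = c :: rest := by
        cases hrev : t.reverse with
        | nil => rw [hrev] at hsplit; have := congrArg List.length hsplit; simp at this; omega
        | cons c rest => exact ⟨c, rest, rfl⟩
      have hchunk : chunk3 t.reverse = (t.drop k).reverse :: chunk3 ((t.take k).reverse) := by
        rw [hcr, chunk3, ← hcr]
        congr 1
        · rw [hsplit, show (3:Nat) = ((t.drop k).reverse).length by simp [htd]]
          exact List.take_left
        · congr 1
          rw [hsplit, show (3:Nat) = ((t.drop k).reverse).length by simp [htd]]
          exact List.drop_left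
      rw [hchunk]
      simp only [List.map_cons, List.reverse_cons, List.reverse_reverse]
      rw [ih (t.take k) (by rw [htk]; omega)
        (by intro hnil; rw [hnil] at htk; simp at htk; omega)]
      -- now: offP (t.take k) ++ [t.drop k] = offP t
      unfold offP
      rw [htk]
      have hmod : k % 3 = t.length % 3 := by omega
      have hoff3 : t.length % 3 ≤ k := by omega
      have htt : (t.take k).take (t.length % 3) = t.take (t.length % 3) := by
        rw [List.take_take, min_eq_left hoff3]
      have hdd : t.drop (t.length % 3) = (t.take k).drop (t.length % 3) ++ t.drop k := by
        have h0 := List.drop_append_of_le_length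
          (l₁ := t.take k) (l₂ := t.drop k) (i := t.length % 3) (by rw [htk]; omega)
        rw [List.take_append_drop] at h0
        exact h0
      rw [hmod, htt, hdd]
      rw [chunk3_append (t.drop k) ((t.take k).drop (t.length % 3)).length _ (le_refl _)
        (by rw [List.length_drop, htk]; omega)]
      rw [chunk3_small (t.drop k) (by intro hnil; rw [hnil] at htd; simp at htd) (by omega)]
      simp [List.append_assoc]

lemma go_no_dot : ∀ (l : List Char) (fuel : Nat) (cur : List Char) (acc : List (List Char)),
    '.' ∉ l → l.length ≤ fuel →
    PySem.Chars.splitOn.go ['.'] fuel l cur acc = ((cur.reverse ++ l) :: acc).reverse := by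
  intro l
  induction l with
  | nil =>
    intro fuel cur acc _ _
    cases fuel <;> simp [PySem.Chars.splitOn.go]
  | cons c rest ih =>
    intro fuel cur acc hmem hf
    cases fuel with
    | zero => simp at hf
    | succ f =>
      rw [PySem.Chars.splitOn.go]
      have hc : c ≠ '.' := fun h => hmem (h ▸ List.mem_cons_self)
      have hpre : ['.'].isPrefixOf (c :: rest) = false := by
        simp [List.isPrefixOf]
        exact fun h => absurd h.symm hc
      rw [hpre]
      simp only [Bool.false_eq_true, if_false]
      rw [ih f (c :: cur) acc (fun h => hmem (List.mem_cons_of_mem _ h)) (by simp at hf ⊢; omega)]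
      simp

lemma go_one_dot : ∀ (a : List Char) (b : List Char) (fuel : Nat) (cur : List Char)
    (acc : List (List Char)), '.' ∉ a → '.' ∉ b → a.length + b.length + 1 ≤ fuel →
    PySem.Chars.splitOn.go ['.'] fuel (a ++ '.' :: b) cur acc =
      (b :: (cur.reverse ++ a) :: acc).reverse := by
  intro a
  induction a with
  | nil =>
    intro b fuel cur acc _ hb hf
    cases fuel with
    | zero => simp at hf
    | succ f =>
      rw [List.nil_append, PySem.Chars.splitOn.go]
      have hpre : ['.'].isPrefixOf ('.' :: b) = true := by simp [List.isPrefixOf]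
      rw [hpre]
      simp only [if_true]
      rw [show List.drop (['.'] : List Char).length ('.' :: b) = b by simp]
      rw [go_no_dot b f [] (cur.reverse :: acc) hb (by simp at hf ⊢; omega)]
      simp
  | cons c a' ih =>
    intro b fuel cur acc ha hb hf
    cases fuel with
    | zero => simp at hf
    | succ f =>
      rw [List.cons_append, PySem.Chars.splitOn.go]
      have hc : c ≠ '.' := fun h => ha (h ▸ List.mem_cons_self)
      have hpre : ['.'].isPrefixOf (c :: (a' ++ '.' :: b)) = false := by
        simp [List.isPrefixOf]
        exact fun h => absurd h.symm hc
      rw [hpre]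
      simp only [Bool.false_eq_true, if_false]
      rw [ih b f (c :: cur) acc (fun h => ha (List.mem_cons_of_mem _ h)) hb
        (by simp at hf ⊢; omega)]
      simp

lemma splitOn_one_dot (a b : List Char) (ha : '.' ∉ a) (hb : '.' ∉ b) :
    PySem.Chars.splitOn (a ++ '.' :: b) ['.'] = [a, b] := by
  unfold PySem.Chars.splitOn
  rw [go_one_dot a b _ [] [] ha hb (by simp)]
  simp

lemma first_dot : ∀ (cs : List Char), '.' ∈ cs →
    cs = cs.takeWhile (· != '.') ++ '.' :: (cs.dropWhile (· != '.')).tail ∧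
      '.' ∉ cs.takeWhile (· != '.') := by
  intro cs
  induction cs with
  | nil => intro h; simp at h
  | cons c rest ih =>
    intro h
    by_cases hc : c = '.'
    · subst hc
      simp [List.takeWhile, List.dropWhile]
    · have hr : '.' ∈ rest := by
        rcases List.mem_cons.mp h with h1 | h1
        · exact absurd h1.symm hc
        · exact h1
      obtain ⟨ih1, ih2⟩ := ih hr
      have hbc : (c != '.') = true := by simpa using hc
      constructor
      · rw [List.takeWhile_cons, List.dropWhile_cons, hbc]
        simp only [if_true, List.cons_append, List.cons_inj_right]
        exact ih1
      · rw [List.takeWhile_cons, hbc]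
        simp only [if_true]
        intro hmem
        rcases List.mem_cons.mp hmem with h1 | h1
        · exact hc h1.symm
        · exact ih2 h1

lemma mapSlice0 (l : List Char) :
    (PySem.List.pyRange 0 (l.length : Int) 3).map
      (fun i => PySem.List.slice l (some i) (some (i + 3))) = chunk3 l := by
  have := mapSliceAux l.length l 0 (by omega)
  simpa using this

lemma core (t : List Char) (ht : t ≠ []) :
    (PySem.Chars.join [','] ((PySem.List.pyRange 0 (t.reverse.length : Int) 3).map
      (fun i => PySem.List.slice t.reverse (some i) (some (i + 3))))).reverse =
    PySem.Chars.join [',']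
      ((if PySem.Int.mod (t.length : Int) 3 = 0 then []
          else [PySem.List.slice t none (some (PySem.Int.mod (t.length : Int) 3))]) ++
        (PySem.List.pyRange (PySem.Int.mod (t.length : Int) 3) (t.length : Int) 3).map
          (fun i => PySem.List.slice t (some i) (some (i + 3)))) := by
  rw [mapSlice0 t.reverse, rev_join, chunk3_rev t.length t (le_refl _) ht]
  have hm : PySem.Int.mod (t.length : Int) 3 = ((t.length % 3 : Nat) : Int) := by
    exact_mod_cast PySem.Int.mod_natCast t.length 3
  rw [hm, PySem.List.slice_to_natCast, mapSliceAux t.length t (t.length % 3) (by omega)]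
  simp only [Nat.cast_eq_zero]
  rfl
lemma or0_ne_nil (l : List Char) :
    (if l.dropWhile (· == '0') = [] then ['0'] else l.dropWhile (· == '0')) ≠ [] := by
  by_cases h0 : l.dropWhile (· == '0') = []
  · rw [if_pos h0]; simp
  · rw [if_neg h0]; exact h0

theorem solutionChars_eq (cs : List Char) (h : cs.count '.' ≤ 1) :
    solutionChars cs = solutionAltChars cs := by
  unfold solutionChars solutionAltChars
  by_cases hdot : '.' ∈ cs
  · obtain ⟨hdec, hna⟩ := first_dot cs hdot
    have hin : PySem.Chars.isIn ['.'] cs = true := by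
      rw [PySem.Chars.isIn_iff_infix]
      exact ⟨cs.takeWhile (· != '.'), (cs.dropWhile (· != '.')).tail, by
        conv_rhs => rw [hdec]
        simp⟩
    have hnb : '.' ∉ (cs.dropWhile (· != '.')).tail := by
      intro hmem
      have hc := congrArg (List.count '.') hdec
      rw [List.count_append, List.count_cons] at hc
      rw [List.count_eq_zero.mpr hna] at hc
      have hpos := List.count_pos_iff.mpr hmem
      simp at hc
      omega
    have hsplit : PySem.Chars.split? cs ['.'] =
        some [cs.takeWhile (· != '.'), (cs.dropWhile (· != '.')).tail] := by
      rw [PySem.Chars.split?]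
      simp only [List.isEmpty_cons]
      conv_lhs => rw [hdec]
      rw [splitOn_one_dot _ _ hna hnb]
      rfl
    rw [hin]
    simp only [if_true, hsplit]
    rw [core _ (or0_ne_nil _)]
  · have hin : PySem.Chars.isIn ['.'] cs = false := by
      rw [PySem.Chars.isIn_eq_false_iff]
      rintro ⟨s', t', heq⟩
      exact hdot (by rw [← heq]; simp)
    have hdw : cs.dropWhile (· != '.') = [] := by
      rw [List.dropWhile_eq_nil_iff]
      intro x hx
      simp only [bne_iff_ne, ne_eq]
      rintro rfl
      exact hdot hx
    have htw : cs.takeWhile (· != '.') = cs := by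
      have hj := List.takeWhile_append_dropWhile (p := (· != '.')) (l := cs)
      rw [hdw, List.append_nil] at hj
      exact hj
    rw [hin]
    simp only [Bool.false_eq_true, if_false]
    rw [htw, hdw]
    rw [core _ (or0_ne_nil _)]
    congr 1

-- ===== VERDICT (by name: the statement is the Claim_ definition above) =====
theorem solution_spec : Claim_equal_solution := by
  intro s _ hp
  unfold Spec_solution solution solution_alt
  exact congrArg String.ofList (solutionChars_eq s.toList hp)
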